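-- pv_equiv track=rewrite | github.com/sophia201552/testing | work_shegnbao/BEOPWebTest/20151104/beopWeb/BEOPMongoDataAccess.py | getTimeNum
-- ===== SOURCE A (Python) =====
-- def getTimeNum(num,factor,type):
--     if type == 'minute':
--         for i in range(num, 60):
--             if i%factor == 0:
--                 return i
--     elif type == 'hour':
--         for i in range(num, 24):
--             if i%factor == 0:
--                 return i
--     return -1
-- ===== SOURCE B (Python) =====
-- def getTimeNum(num, factor, type):
--     limit = 60 if type == 'minute' else 24 if type == 'hour' else None
--     if limit is None or num >= limit:
--         return -1
--     nxt = num + (-num) % abs(factor)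
--     return nxt if nxt < limit else -1
-- ===== Notes on version B (the rewrite author's own statement) =====
-- stated objective: simpler
-- what changed: Replaces the bounded linear scan for the first multiple of factor with a direct modular computation (next multiple at or above num via num + (-num) % abs(factor)).
import Mathlib
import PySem

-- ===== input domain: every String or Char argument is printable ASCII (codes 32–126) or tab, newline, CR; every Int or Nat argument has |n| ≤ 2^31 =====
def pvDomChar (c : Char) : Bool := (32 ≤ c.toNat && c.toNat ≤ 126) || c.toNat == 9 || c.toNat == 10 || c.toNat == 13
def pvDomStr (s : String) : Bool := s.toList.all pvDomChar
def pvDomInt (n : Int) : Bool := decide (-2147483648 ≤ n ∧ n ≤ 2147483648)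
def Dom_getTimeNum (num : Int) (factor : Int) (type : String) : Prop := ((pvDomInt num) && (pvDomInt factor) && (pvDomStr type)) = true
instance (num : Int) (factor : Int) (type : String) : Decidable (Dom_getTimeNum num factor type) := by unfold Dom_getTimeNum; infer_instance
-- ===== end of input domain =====

-- B replaces A's linear scan for the first multiple of factor with a direct modular computation (simpler, O(1)).

-- ===== PORT A =====
-- first i in the list with i % factor == 0 (Python %), as the for-loop scans it
def pvFindDiv : List Int → Int → Option Int
  | [], _ => none
  | i :: rest, f => if PySem.Int.mod i f = 0 then some i else pvFindDiv rest f

def getTimeNum (num : Int) (factor : Int) (type : String) : Int :=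
  if type == "minute" then
    match pvFindDiv (PySem.List.pyRange num 60 1) factor with
    | some i => i
    | none => -1
  else if type == "hour" then
    match pvFindDiv (PySem.List.pyRange num 24 1) factor with
    | some i => i
    | none => -1
  else -1

-- ===== PORT B =====
def getTimeNum_alt (num : Int) (factor : Int) (type : String) : Int :=
  let limit : Option Int := if type == "minute" then some 60 else if type == "hour" then some 24 else none
  match limit with
  | none => -1
  | some L =>
    if num ≥ L then -1
    else
      let nxt := num + PySem.Int.mod (-num) |factor|
      if nxt < L then nxt else -1

-- ===== PRECONDITION & SPEC =====
-- Pre_ excludes exactly the inputs where A raises ZeroDivisionError (factor = 0 with a nonempty scan);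
-- B raises there too.
def Pre_getTimeNum (num : Int) (factor : Int) (type : String) : Prop :=
  ¬ (factor = 0 ∧ ((type = "minute" ∧ num < 60) ∨ (type = "hour" ∧ num < 24)))
instance (num : Int) (factor : Int) (type : String) : Decidable (Pre_getTimeNum num factor type) := by unfold Pre_getTimeNum; infer_instance

def pvWitness_getTimeNum : Int × Int × String := (7, 5, "minute")

def Spec_getTimeNum (num : Int) (factor : Int) (type : String) (out : Int) : Prop := out = getTimeNum_alt num factor type
instance (num : Int) (factor : Int) (type : String) (out : Int) : Decidable (Spec_getTimeNum num factor type out) := by unfold Spec_getTimeNum; infer_instance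

-- ===== CLAIM (what is proved, stated in full; the proofs are below) =====
def Claim_equal_getTimeNum : Prop := ∀ (num : Int) (factor : Int) (type : String), Dom_getTimeNum num factor type → Pre_getTimeNum num factor type → Spec_getTimeNum num factor type (getTimeNum num factor type)

-- ===== LEMMAS AND PROOFS =====

-- Python's i % f is 0 exactly when f divides i (f ≠ 0), i.e. when i % |f| = 0
lemma pvMod_zero_iff (i f : Int) (_hf : f ≠ 0) :
    PySem.Int.mod i f = 0 ↔ i % |f| = 0 := by
  rw [PySem.Int.mod_eq_zero_iff_dvd, ← abs_dvd, Int.dvd_iff_emod_eq_zero]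

-- the scan over range(n, L) finds exactly n + (-n) % |f| when that lies below L
lemma pvFindDiv_pyRange (factor : Int) (hf : factor ≠ 0) :
    ∀ (k : Nat) (n L : Int), (L - n).toNat = k →
      pvFindDiv (PySem.List.pyRange n L 1) factor =
        (if n + (-n) % |factor| < L then some (n + (-n) % |factor|) else none) := by
  intro k
  induction k with
  | zero =>
    intro n L hk
    have hL : L ≤ n := by omega
    rw [PySem.List.pyRange_one_eq_nil hL]
    have hnn : 0 ≤ (-n) % |factor| := Int.emod_nonneg (-n) (abs_ne_zero.mpr hf)
    have hlt : ¬ (n + (-n) % |factor| < L) := by omega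
    simp only [pvFindDiv, if_neg hlt]
  | succ k ih =>
    intro n L hk
    have hnL : n < L := by omega
    have hfa : (0:Int) < |factor| := abs_pos.mpr hf
    rw [PySem.List.pyRange_one_cons hnL]
    by_cases hd : PySem.Int.mod n factor = 0
    · have h0 : (-n) % |factor| = 0 :=
        Int.emod_eq_zero_of_dvd (dvd_neg.mpr (Int.dvd_of_emod_eq_zero ((pvMod_zero_iff n factor hf).mp hd)))
      simp only [pvFindDiv, if_pos hd, h0, add_zero, if_pos hnL]
    · have h0 : n % |factor| ≠ 0 := fun h => hd ((pvMod_zero_iff n factor hf).mpr h)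
      have h5 : (-n) % |factor| ≠ 0 := fun h =>
        h0 (Int.emod_eq_zero_of_dvd (dvd_neg.mp (Int.dvd_of_emod_eq_zero h)))
      have hrec := ih (n + 1) L (by omega)
      rw [pvFindDiv]
      simp only [hd, if_false]
      rw [hrec]
      have h1 : 0 ≤ (-n) % |factor| := Int.emod_nonneg (-n) (abs_ne_zero.mpr hf)
      have h2 : (-n) % |factor| < |factor| := Int.emod_lt_of_pos (-n) hfa
      have hf2 : 2 ≤ |factor| := by
        rcases lt_or_ge |factor| 2 with h | h
        · exfalso; apply h5
          have : |factor| = 1 := by omega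
          simp [this]
        · exact h
      -- (-(n+1)) = (-n) - 1; with (-n) % |f| ≥ 1 the residue just drops by one
      have h6 : (-(n+1)) % |factor| = (-n) % |factor| - 1 := by
        have e1 : (-(n+1) : Int) = (-n) - 1 := by ring
        have e2 : ((-n) - 1) % |factor| = ((-n) % |factor| - 1 % |factor|) % |factor| :=
          Int.sub_emod _ _ _
        have e3 : (1:Int) % |factor| = 1 := Int.emod_eq_of_lt (by omega) (by omega)
        have e4 : ((-n) % |factor| - 1) % |factor| = (-n) % |factor| - 1 :=
          Int.emod_eq_of_lt (by omega) (by omega)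
        rw [e1, e2, e3, e4]
      have hshift : (n + 1) + (-(n + 1)) % |factor| = n + (-n) % |factor| := by omega
      rw [hshift]

lemma getTimeNum_eq_alt_of_limit (num factor L : Int) (hf : factor ≠ 0) :
    (match pvFindDiv (PySem.List.pyRange num L 1) factor with
      | some i => i
      | none => (-1 : Int)) =
    (if num ≥ L then (-1 : Int)
     else
       let nxt := num + PySem.Int.mod (-num) |factor|
       if nxt < L then nxt else -1) := by
  rw [pvFindDiv_pyRange factor hf (L - num).toNat num L rfl]
  have hfa : (0:Int) < |factor| := abs_pos.mpr hf
  have hm : PySem.Int.mod (-num) |factor| = (-num) % |factor| :=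
    PySem.Int.mod_eq_emod_of_pos hfa
  have hnn : 0 ≤ (-num) % |factor| := Int.emod_nonneg (-num) (abs_ne_zero.mpr hf)
  simp only [hm]
  by_cases hge : num ≥ L
  · simp only [if_neg (show ¬ (num + -num % |factor| < L) by omega), if_pos hge]
  · simp only [if_neg hge]
    by_cases hlt : num + -num % |factor| < L
    · simp only [if_pos hlt]
    · simp only [if_neg hlt]

-- ===== VERDICT (by name: the statement is the Claim_ definition above) =====
theorem getTimeNum_spec : Claim_equal_getTimeNum := by
  intro num factor type _ hpre
  unfold Spec_getTimeNum getTimeNum getTimeNum_alt Pre_getTimeNum at *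
  by_cases hm : type == "minute"
  · have ht : type = "minute" := by simpa using hm
    subst ht
    simp only [hm, if_true]
    by_cases hlt : num < 60
    · have hf : factor ≠ 0 := by tauto
      exact getTimeNum_eq_alt_of_limit num factor 60 hf
    · rw [PySem.List.pyRange_one_eq_nil (show (60:Int) ≤ num by omega)]
      simp only [pvFindDiv, if_pos (show num ≥ (60:Int) by omega)]
  · by_cases hh : type == "hour"
    · have ht : type = "hour" := by simpa using hh
      subst ht
      simp only [hm, hh, if_true]
      by_cases hlt : num < 24
      · have hf : factor ≠ 0 := by tauto
        exact getTimeNum_eq_alt_of_limit num factor 24 hf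
      · rw [PySem.List.pyRange_one_eq_nil (show (24:Int) ≤ num by omega)]
        simp [pvFindDiv, show num ≥ (24:Int) by omega]
    · simp [hm, hh]
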